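-- pv_equiv track=rewrite | github.com/big-oofff/school-projects | dict.py | word_append
-- ===== SOURCE A (Python) =====
-- def word_append(array):
--     d = {}
--     result = ""
--     for word in array:
--         if word in d:
--             d[word] += 1
--         else:
--             d[word] = 1
--         if d[word] % 2 == 0:
--             result += word
--     return result
-- ===== SOURCE B (Python) =====
-- def word_append(array):
--     occ = {}
--     for i, w in enumerate(array):
--         occ.setdefault(w, []).append(i)
--     out = [""] * len(array)
--     for w, positions in occ.items():
--         for j, i in enumerate(positions):
--             if j % 2 == 1:
--                 out[i] = w
--     return "".join(out)
-- ===== Notes on version B (the rewrite author's own statement) =====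
-- stated objective: alternative
-- what changed: Replaces A's single pass with a running count dict by a staged grouping algorithm: build an inverted index word -> list of occurrence positions, scatter each word's 2nd, 4th, ... occurrence positions into a placeholder buffer of the array's length, and join the buffer; no running counts or per-step parity state remain.
import Mathlib
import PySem

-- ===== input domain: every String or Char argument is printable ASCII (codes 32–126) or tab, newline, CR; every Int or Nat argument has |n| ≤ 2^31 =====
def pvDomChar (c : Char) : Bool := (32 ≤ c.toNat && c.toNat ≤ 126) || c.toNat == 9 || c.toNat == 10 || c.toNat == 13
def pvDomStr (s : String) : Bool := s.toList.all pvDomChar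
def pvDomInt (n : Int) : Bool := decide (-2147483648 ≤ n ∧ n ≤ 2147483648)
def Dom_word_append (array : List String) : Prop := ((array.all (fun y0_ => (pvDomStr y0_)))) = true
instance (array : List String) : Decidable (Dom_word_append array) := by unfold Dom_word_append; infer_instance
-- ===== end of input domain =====

-- B replaces A's running-count pass by a staged grouping algorithm: build an inverted
-- index word -> occurrence positions, scatter each word's 2nd, 4th, ... occurrence
-- positions into a placeholder buffer, and join the buffer (alternative decomposition).

-- ===== PORT A =====
def wordAppendLoopA : List String → PySem.Dict String Int → String → String
  | [], _, result => result
  | word :: rest, d, result =>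
    let d' := if d.contains word then d.insert word (d.getD word 0 + 1) else d.insert word 1
    let result' := if PySem.Int.mod (d'.getD word 0) 2 == 0 then result ++ word else result
    wordAppendLoopA rest d' result'

def word_append (array : List String) : String :=
  wordAppendLoopA array PySem.Dict.empty ""

-- ===== PORT B =====
-- pass 1: 'occ.setdefault(w, []).append(i)'  =  occ[w] = occ.get(w, []) + [i]
def wordOccLoop : List (Int × String) → PySem.Dict String (List Int) → PySem.Dict String (List Int)
  | [], occ => occ
  | (i, w) :: rest, occ => wordOccLoop rest (occ.modify w [] (· ++ [i]))

-- inner loop: 'for j, i in enumerate(positions): if j % 2 == 1: out[i] = w'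
-- (i comes from enumerate over the array, so it is a valid nonnegative index; 'out[i] = w' is List.set)
def wordScatterLoop : List (Int × Int) → String → List String → List String
  | [], _, out => out
  | (j, i) :: rest, w, out =>
    wordScatterLoop rest w (if PySem.Int.mod j 2 == 1 then out.set i.toNat w else out)

-- outer loop: 'for w, positions in occ.items()'
def wordOuterLoop : List (String × List Int) → List String → List String
  | [], out => out
  | (w, ps) :: rest, out => wordOuterLoop rest (wordScatterLoop (PySem.List.enumerate ps 0) w out)

def word_append_alt (array : List String) : String :=
  PySem.Str.join "" (wordOuterLoop
    (wordOccLoop (PySem.List.enumerate array 0) PySem.Dict.empty).items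
    (List.replicate array.length ""))

-- ===== PRECONDITION & SPEC =====
def Spec_word_append (array : List String) (out : String) : Prop := out = word_append_alt array
instance (array : List String) (out : String) : Decidable (Spec_word_append array out) := by unfold Spec_word_append; infer_instance

-- ===== CLAIM (what is proved, stated in full; the proofs are below) =====
def Claim_equal_word_append : Prop := ∀ (array : List String), Dom_word_append array → Spec_word_append array (word_append array)

-- ===== LEMMAS AND PROOFS =====

-- string plumbing
lemma join_nil' : PySem.Str.join "" ([] : List String) = "" := by
  apply String.toList_inj.mp; simp [PySem.Str.join, PySem.Chars.join, List.intercalate]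

lemma join_cons (x : String) (xs : List String) :
    PySem.Str.join "" (x :: xs) = x ++ PySem.Str.join "" xs := by
  apply String.toList_inj.mp
  cases xs <;> simp [PySem.Str.join, PySem.Chars.join, List.intercalate]

lemma str_append_assoc (a b c : String) : (a ++ b) ++ c = a ++ (b ++ c) := by
  apply String.toList_inj.mp; simp

lemma str_append_empty (a : String) : a ++ "" = a := by
  apply String.toList_inj.mp; simp

lemma str_empty_append (a : String) : "" ++ a = a := by
  apply String.toList_inj.mp; simp

-- Python '% 2' of a nonnegative int is the Nat '% 2'
lemma pymod_two (c : Nat) : PySem.Int.mod (c : Int) 2 = ((c % 2 : Nat) : Int) := by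
  have h1 := PySem.Int.floordiv_mul_add_mod (c : Int) 2
  rcases PySem.Int.mod_two_eq (c : Int) with h | h <;> omega

-- the selected chunk at each position: word if its count in the prefix-so-far incl. itself is even, else ""
def selChunks : List String → List String → List String
  | _, [] => []
  | p, w :: rest => (if (p.count w + 1) % 2 = 0 then w else "") :: selChunks (p ++ [w]) rest

-- ===== A side =====
lemma loopA_eq : ∀ (l p : List String) (d : PySem.Dict String Int) (res : String),
    (∀ w, d.getD w 0 = (p.count w : Int)) →
    wordAppendLoopA l d res = res ++ PySem.Str.join "" (selChunks p l) := by
  intro l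
  induction l with
  | nil => intro p d res _; rw [wordAppendLoopA, selChunks, join_nil', str_append_empty]
  | cons word rest ih =>
    intro p d res hinv
    have hd' : (if d.contains word then d.insert word (d.getD word 0 + 1)
        else d.insert word 1) = d.insert word (d.getD word 0 + 1) := by
      by_cases h : d.contains word = true
      · simp [h]
      · have h0 : d.getD word 0 = 0 :=
          PySem.Dict.getD_of_not_contains d 0 (by simpa using h)
        simp [h, h0]
    have hcnt : d.getD word 0 + 1 = ((p.count word + 1 : Nat) : Int) := by
      rw [hinv word]; push_cast; ring
    have hinv' : ∀ w, (d.insert word (d.getD word 0 + 1)).getD w 0 = ((p ++ [word]).count w : Int) := by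
      intro w
      rw [PySem.Dict.getD_insert, List.count_append]
      by_cases hw : w = word
      · subst hw; simp [hcnt]
      · simp [hw, Ne.symm hw, hinv w]
    have hmod : PySem.Int.mod ((d.insert word (d.getD word 0 + 1)).getD word 0) 2
        = (((p.count word + 1) % 2 : Nat) : Int) := by
      rw [PySem.Dict.getD_insert_self, hcnt, pymod_two]
    rw [wordAppendLoopA, selChunks, join_cons]
    simp only [hd', hmod]
    by_cases hc : (p.count word + 1) % 2 = 0
    · rw [if_pos hc, hc]
      have : ((((0:Nat)) : Int) == (0:Int)) = true := by decide
      rw [Nat.cast_zero, if_pos (by decide : ((0:Int) == 0) = true)]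
      rw [ih (p ++ [word]) _ _ hinv', ← str_append_assoc]
    · have h1 : (p.count word + 1) % 2 = 1 := by omega
      rw [if_neg hc, h1]
      rw [if_neg (by decide : ¬ ((((1:Nat)):Int) == 0) = true)]
      rw [ih (p ++ [word]) _ _ hinv', str_empty_append]

-- ===== B side =====
-- pass 1 value at a key
lemma occ_getD (l : List (Int × String)) (occ : PySem.Dict String (List Int)) (w : String) :
    (wordOccLoop l occ).getD w [] = occ.getD w [] ++ (l.filter (fun p => p.2 == w)).map (·.1) := by
  induction l generalizing occ with
  | nil => simp [wordOccLoop]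
  | cons q rest ih =>
    obtain ⟨i, x⟩ := q
    rw [wordOccLoop, ih]
    rw [PySem.Dict.getD_modify]
    by_cases h : x = w
    · subst h; simp
    · simp [h, Ne.symm h]

lemma occLoop_eq_foldl (l : List (Int × String)) (occ : PySem.Dict String (List Int)) :
    wordOccLoop l occ = l.foldl (fun d p => d.modify p.2 [] (· ++ [p.1])) occ := by
  induction l generalizing occ with
  | nil => rfl
  | cons q rest ih => obtain ⟨i, x⟩ := q; rw [wordOccLoop, ih]; rfl

-- occurrence-index list of a word, with starting offset
def occIdx (w : String) : List String → Int → List Int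
  | [], _ => []
  | x :: rest, s => (if x = w then [s] else []) ++ occIdx w rest (s + 1)

lemma occList_eq (w : String) : ∀ (l : List String) (s : Int),
    ((PySem.List.enumerate l s).filter (fun p => p.2 == w)).map (·.1) = occIdx w l s := by
  intro l
  induction l with
  | nil => intro s; simp [occIdx, PySem.List.enumerate_nil]
  | cons x rest ih =>
    intro s
    rw [PySem.List.enumerate_cons, List.filter_cons]
    by_cases h : x = w <;> simp [occIdx, h, ih]

lemma mem_occIdx (w : String) : ∀ (l : List String) (s i : Int),
    i ∈ occIdx w l s → ∃ m : Nat, m < l.length ∧ i = s + m := by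
  intro l
  induction l with
  | nil => intro s i h; simp [occIdx] at h
  | cons x rest ih =>
    intro s i h
    rw [occIdx] at h
    rcases List.mem_append.mp h with h1 | h1
    · refine ⟨0, by simp, ?_⟩
      by_cases hx : x = w <;> simp [hx] at h1
      simp [h1]
    · obtain ⟨m, hm, hi⟩ := ih (s + 1) i h1
      exact ⟨m + 1, by simpa using hm, by push_cast [hi]; ring⟩

-- does the scatter of this position list write index k?
def hitB (k : Nat) (l : List (Int × Int)) : Bool :=
  l.any (fun q => (PySem.Int.mod q.1 2 == 1) && (q.2 == (k : Int)))

lemma hit_occIdx (w : String) : ∀ (l : List String) (s c : Int) (k : Nat),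
    hitB k (PySem.List.enumerate (occIdx w l s) c) = true ↔
      ∃ m : Nat, m < l.length ∧ s + m = k ∧ l[m]? = some w ∧
        PySem.Int.mod (c + ((l.take m).count w : Int)) 2 = 1 := by
  intro l
  induction l with
  | nil => intro s c k; simp [occIdx, PySem.List.enumerate_nil, hitB]
  | cons x rest ih =>
    intro s c k
    by_cases hx : x = w
    · subst hx
      rw [show occIdx x (x :: rest) s = s :: occIdx x rest (s + 1) by simp [occIdx]]
      rw [PySem.List.enumerate_cons]
      constructor
      · intro h
        simp only [hitB, List.any_cons, Bool.or_eq_true, Bool.and_eq_true, beq_iff_eq] at h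
        rcases h with ⟨h1, h2⟩ | h2
        · exact ⟨0, by simp, by omega, by simp, by simpa using h1⟩
        · obtain ⟨m, hm, hk, hw, hmod⟩ := (ih (s + 1) (c + 1) k).mp (by simpa [hitB] using h2)
          refine ⟨m + 1, by simpa using hm, by push_cast at hk ⊢; omega, by simpa using hw, ?_⟩
          simp only [List.take_succ_cons, List.count_cons_self]
          push_cast at hmod ⊢
          convert hmod using 2
          ring
      · rintro ⟨m, hm, hk, hw, hmod⟩
        simp only [hitB, List.any_cons, Bool.or_eq_true, Bool.and_eq_true, beq_iff_eq]
        match m with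
        | 0 => exact Or.inl ⟨by simpa using hmod, by omega⟩
        | m + 1 =>
          refine Or.inr ?_
          have := (ih (s + 1) (c + 1) k).mpr ⟨m, by simpa using hm,
            by push_cast at hk ⊢; omega, by simpa using hw, by
              simp only [List.take_succ_cons, List.count_cons_self] at hmod
              push_cast at hmod ⊢
              convert hmod using 2
              ring⟩
          simpa [hitB] using this
    · rw [show occIdx w (x :: rest) s = occIdx w rest (s + 1) by simp [occIdx, hx]]
      rw [ih (s + 1) c k]
      have hcw : ∀ m : Nat, ((x :: rest).take (m + 1)).count w = (rest.take m).count w := by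
        intro m
        have hwx : ¬ w = x := fun h => hx h.symm
        simp [List.take_succ_cons, hx]
      constructor
      · rintro ⟨m, hm, hk, hw, hmod⟩
        refine ⟨m + 1, by simpa using hm, by push_cast at hk ⊢; omega, by simpa using hw, ?_⟩
        rw [hcw m]
        exact hmod
      · rintro ⟨m, hm, hk, hw, hmod⟩
        match m with
        | 0 => exact absurd (by simpa using hw) hx
        | m + 1 =>
          refine ⟨m, by simpa using hm, by push_cast at hk ⊢; omega, by simpa using hw, ?_⟩
          rw [hcw m] at hmod
          exact hmod

lemma scatter_len : ∀ (l : List (Int × Int)) (w : String) (out : List String),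
    (wordScatterLoop l w out).length = out.length := by
  intro l
  induction l with
  | nil => intro w out; rfl
  | cons q rest ih =>
    intro w out
    obtain ⟨j, i⟩ := q
    rw [wordScatterLoop, ih]
    split <;> simp

lemma scatter_get : ∀ (l : List (Int × Int)) (w : String) (out : List String) (k : Nat),
    (∀ q ∈ l, 0 ≤ q.2 ∧ q.2.toNat < out.length) →
    (wordScatterLoop l w out)[k]? = if hitB k l then some w else out[k]? := by
  intro l
  induction l with
  | nil => intro w out k _; simp [wordScatterLoop, hitB]
  | cons q rest ih =>
    intro w out k hb
    obtain ⟨j, i⟩ := q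
    obtain ⟨hi0, hilen⟩ := hb (j, i) (List.mem_cons_self)
    have hbrest : ∀ q ∈ rest, 0 ≤ q.2 ∧ q.2.toNat < out.length :=
      fun q hq => hb q (List.mem_cons_of_mem _ hq)
    rw [wordScatterLoop]
    have hany : hitB k ((j, i) :: rest)
        = (((PySem.Int.mod j 2 == 1) && (i == (k : Int))) || hitB k rest) := by
      simp [hitB]
    by_cases hj : (PySem.Int.mod j 2 == 1) = true
    · rw [if_pos hj]
      rw [ih w (out.set i.toNat w) k (by simpa using hbrest)]
      rw [hany, hj]
      by_cases hr : hitB k rest = true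
      · simp [hr]
      · simp only [hr, Bool.or_false, Bool.true_and]
        by_cases hik : i = (k : Int)
        · subst hik
          simp only [Int.toNat_natCast] at hilen ⊢
          simp [hilen]
        · have hne : i.toNat ≠ k := by omega
          simp only [ne_eq, hne, not_false_eq_true, List.getElem?_set_ne]
          simp [hik]
    · rw [if_neg hj, ih w out k hbrest, hany]
      simp only [Bool.not_eq_true] at hj
      rw [hj]
      simp

lemma outer_get (v : String) : ∀ (items : List (String × List Int)) (out : List String) (k : Nat),
    (∀ p ∈ items, ∀ i ∈ p.2, 0 ≤ i ∧ i.toNat < out.length) →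
    (∀ p ∈ items, hitB k (PySem.List.enumerate p.2 0) = true → p.1 = v) →
    (wordOuterLoop items out)[k]? =
      if items.any (fun p => hitB k (PySem.List.enumerate p.2 0)) then some v else out[k]? := by
  intro items
  induction items with
  | nil => intro out k _ _; simp [wordOuterLoop]
  | cons p rest ih =>
    intro out k hb hv
    obtain ⟨w, ps⟩ := p
    rw [wordOuterLoop]
    have hlen : (wordScatterLoop (PySem.List.enumerate ps 0) w out).length = out.length :=
      scatter_len _ _ _
    have hbe : ∀ q ∈ PySem.List.enumerate ps 0, 0 ≤ q.2 ∧ q.2.toNat < out.length := by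
      intro q hq
      obtain ⟨m, hm, rfl⟩ := (PySem.List.mem_enumerate_iff _ _ _).mp hq
      exact hb (w, ps) (List.mem_cons_self) _ (by simp)
    rw [ih _ k (by intro p hp i hi; rw [hlen]; exact hb p (List.mem_cons_of_mem _ hp) i hi)
        (fun p hp => hv p (List.mem_cons_of_mem _ hp))]
    rw [List.any_cons]
    by_cases hr : rest.any (fun p => hitB k (PySem.List.enumerate p.2 0)) = true
    · simp [hr]
    · have hrf : rest.any (fun p => hitB k (PySem.List.enumerate p.2 0)) = false := by
        simpa using hr
      rw [hrf]
      simp only [Bool.or_false, if_neg (by simp : ¬ (false = true))]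
      rw [scatter_get _ w out k hbe]
      have hwv := hv (w, ps) List.mem_cons_self
      simp only at hwv
      by_cases hh : hitB k (PySem.List.enumerate ps 0) = true
      · rw [hwv hh]
      · rw [if_neg hh, if_neg hh]

lemma selChunks_get : ∀ (l p : List String) (m : Nat),
    (selChunks p l)[m]? = if m < l.length then
        some (if ((p ++ l.take m).count (l.getD m "") + 1) % 2 = 0 then l.getD m "" else "")
      else none := by
  intro l
  induction l with
  | nil => intro p m; simp [selChunks]
  | cons w rest ih =>
    intro p m
    match m with
    | 0 => simp [selChunks]
    | m + 1 =>
      rw [selChunks]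
      simp only [List.getElem?_cons_succ, List.take_succ_cons, List.getD_cons_succ,
        List.length_cons, Nat.add_lt_add_iff_right]
      rw [ih (p ++ [w]) m]
      simp [List.append_assoc]

-- B's buffer equals the chunk list
lemma buffer_eq (array : List String) :
    wordOuterLoop (wordOccLoop (PySem.List.enumerate array 0) PySem.Dict.empty).items
        (List.replicate array.length "") = selChunks [] array := by
  set occ := wordOccLoop (PySem.List.enumerate array 0) PySem.Dict.empty with hocc
  have hfold := occLoop_eq_foldl (PySem.List.enumerate array 0) PySem.Dict.empty
  have hkeys : occ.keys = PySem.Set.ofList array := by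
    rw [hocc, hfold,
      PySem.Dict.keys_foldl_modify_key (PySem.List.enumerate array 0) (fun p => p.2) []
        (fun _ p => (fun v => v ++ [p.1])) PySem.Dict.empty,
      PySem.Dict.keys_empty, PySem.List.map_snd_enumerate, PySem.Set.update_nil_left]
  have hnd : occ.keys.Nodup := by
    rw [hocc, hfold]
    exact PySem.Dict.nodup_keys_foldl_modify_key _ _ _ _ _ (by simp [PySem.Dict.keys_empty])
  have hget : ∀ w, occ.getD w [] = occIdx w array 0 := by
    intro w
    rw [hocc, occ_getD, PySem.Dict.getD_empty, occList_eq]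
    simp
  have hitems : occ.items = occ.keys.map (fun w => (w, occIdx w array 0)) := by
    rw [PySem.Dict.items_eq_map_keys occ hnd []]
    exact List.map_congr_left (fun w _ => by rw [hget w])
  apply List.ext_getElem?
  intro k
  have hb : ∀ p ∈ occ.items, ∀ i ∈ p.2, 0 ≤ i ∧ i.toNat < (List.replicate array.length "").length := by
    rw [hitems]
    intro p hp i hi
    obtain ⟨w, hw, rfl⟩ := List.mem_map.mp hp
    obtain ⟨m, hm, rfl⟩ := mem_occIdx w array 0 i hi
    simp only [List.length_replicate]
    constructor <;> omega
  have hv : ∀ p ∈ occ.items, hitB k (PySem.List.enumerate p.2 0) = true → p.1 = array.getD k "" := by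
    rw [hitems]
    intro p hp hh
    obtain ⟨w, hw, rfl⟩ := List.mem_map.mp hp
    obtain ⟨m, hm, hk, hwm, _⟩ := (hit_occIdx w array 0 0 k).mp hh
    have hmk : m = k := by omega
    subst hmk
    simp only [List.getD_eq_getElem?_getD, hwm]
    rfl
  rw [outer_get (array.getD k "") occ.items (List.replicate array.length "") k hb hv]
  rw [selChunks_get array [] k]
  simp only [List.nil_append]
  have hany : occ.items.any (fun p => hitB k (PySem.List.enumerate p.2 0)) = true ↔
      (k < array.length ∧ ((array.take k).count (array.getD k "")) % 2 = 1) := by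
    rw [hitems, List.any_map, List.any_eq_true]
    constructor
    · rintro ⟨w, hw, hh⟩
      obtain ⟨m, hm, hk, hwm, hpar⟩ := (hit_occIdx w array 0 0 k).mp hh
      have hmk : m = k := by omega
      subst hmk
      have hwd : array.getD m "" = w := by simp [List.getD_eq_getElem?_getD, hwm]
      rw [hwd]
      refine ⟨hm, ?_⟩
      rw [zero_add, pymod_two] at hpar
      exact_mod_cast hpar
    · rintro ⟨hk, hpar⟩
      have hwm : array[k]? = some (array.getD k "") := by
        simp [List.getD_eq_getElem?_getD, List.getElem?_eq_getElem hk]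
      refine ⟨array.getD k "", ?_, (hit_occIdx _ array 0 0 k).mpr
        ⟨k, hk, by omega, hwm, by rw [zero_add, pymod_two]; exact_mod_cast hpar⟩⟩
      rw [hkeys, PySem.Set.mem_ofList]
      exact List.mem_of_getElem? hwm
  by_cases hk : k < array.length
  · rw [if_pos hk]
    by_cases hp : ((array.take k).count (array.getD k "")) % 2 = 1
    · rw [if_pos (hany.mpr ⟨hk, hp⟩), if_pos (by omega)]
    · rw [if_neg (fun hh => hp (hany.mp hh).2), if_neg (by omega)]
      simp [hk]
  · rw [if_neg hk, if_neg (fun hh => hk (hany.mp hh).1)]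
    simp [hk]

-- ===== VERDICT (by name: the statement is the Claim_ definition above) =====
theorem word_append_spec : Claim_equal_word_append := by
  intro array _
  unfold Spec_word_append word_append word_append_alt
  rw [loopA_eq array [] PySem.Dict.empty "" (by intro w; simp [PySem.Dict.getD_empty]), buffer_eq]
  apply String.toList_inj.mp; simp
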